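-- pv_equiv track=rewrite | github.com/bitscopic/BIAS-2015 | src/bias_2015/benign_classifiers.py | get_variant_indel_length
-- ===== SOURCE A (Python) =====
-- def get_variant_indel_length(ref, alt):
--     """
--     Compute the true length of an indel by trimming common prefixes and suffixes.
--     Returns the length of the actual insertion or deletion event.
--     """
--     # Trim common prefix
--     while len(ref) > 0 and len(alt) > 0 and ref[0] == alt[0]:
--         ref = ref[1:]
--         alt = alt[1:]
--
--     # Trim common suffix
--     while len(ref) > 0 and len(alt) > 0 and ref[-1] == alt[-1]:
--         ref = ref[:-1]
--         alt = alt[:-1]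
--
--     # True length of the indel (in nucleotides)
--     return max(len(ref), len(alt))
-- ===== SOURCE B (Python) =====
-- def get_variant_indel_length(ref, alt):
--     """Two-pointer index scan: no string copies, O(n)."""
--     lr, la = len(ref), len(alt)
--     m = min(lr, la)
--     i = 0
--     while i < m and ref[i] == alt[i]:
--         i += 1
--     j = 0
--     while j < m - i and ref[lr - 1 - j] == alt[la - 1 - j]:
--         j += 1
--     return max(lr, la) - i - j
-- ===== Notes on version B (the rewrite author's own statement) =====
-- stated objective: faster
-- what changed: Replaced A's repeated one-character slicing of both strings (each slice copies the whole remainder) by a two-pointer index scan that counts the common prefix and the bounded common suffix and returns max(len)-i-j arithmetically.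
import Mathlib
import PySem

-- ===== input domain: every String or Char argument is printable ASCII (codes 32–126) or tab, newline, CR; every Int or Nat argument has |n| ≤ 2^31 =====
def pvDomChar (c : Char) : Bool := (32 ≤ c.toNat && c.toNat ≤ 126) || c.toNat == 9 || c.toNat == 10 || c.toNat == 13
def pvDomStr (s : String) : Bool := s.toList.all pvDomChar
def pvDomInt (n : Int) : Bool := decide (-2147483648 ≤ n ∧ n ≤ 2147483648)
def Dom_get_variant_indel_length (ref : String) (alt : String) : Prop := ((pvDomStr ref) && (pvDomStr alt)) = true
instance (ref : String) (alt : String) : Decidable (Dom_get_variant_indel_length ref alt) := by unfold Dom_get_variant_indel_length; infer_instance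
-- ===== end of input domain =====

-- B replaces A's repeated one-character string slicing by a two-pointer index scan (objective: faster; timed).

-- ===== PORT A =====
-- while len(ref)>0 and len(alt)>0 and ref[0]==alt[0]: ref=ref[1:]; alt=alt[1:]
def pvTrimPrefix : List Char → List Char → List Char × List Char
  | x :: xs, y :: ys => if x = y then pvTrimPrefix xs ys else (x :: xs, y :: ys)
  | r, a => (r, a)

-- while len(ref)>0 and len(alt)>0 and ref[-1]==alt[-1]: ref=ref[:-1]; alt=alt[:-1]
-- (getLastD is only read under the nonemptiness guards, so it is exactly Python's ref[-1])
def pvTrimSuffix (r a : List Char) : List Char × List Char :=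
  if r ≠ [] ∧ a ≠ [] ∧ r.getLastD ' ' = a.getLastD ' ' then
    pvTrimSuffix r.dropLast a.dropLast
  else (r, a)
termination_by r.length
decreasing_by
  rename_i h
  have : 0 < r.length := List.length_pos_of_ne_nil h.1
  simp [List.length_dropLast]; omega

def get_variant_indel_length (ref : String) (alt : String) : Int :=
  let p1 := pvTrimPrefix ref.toList alt.toList
  let p2 := pvTrimSuffix p1.1 p1.2
  ((max p2.1.length p2.2.length : Nat) : Int)

-- ===== PORT B =====
-- while i < m and ref[i] == alt[i]: i += 1      (indices always in range, so getD is exact)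
def pvLoopI (r a : List Char) (m i : Nat) : Nat :=
  if i < m ∧ r.getD i ' ' = a.getD i ' ' then pvLoopI r a m (i + 1) else i
termination_by m - i
decreasing_by rename_i h; omega

-- while j < m - i and ref[lr-1-j] == alt[la-1-j]: j += 1
def pvLoopJ (r a : List Char) (lr la m i j : Nat) : Nat :=
  if j < m - i ∧ r.getD (lr - 1 - j) ' ' = a.getD (la - 1 - j) ' ' then
    pvLoopJ r a lr la m i (j + 1)
  else j
termination_by m - i - j
decreasing_by rename_i h; omega

def get_variant_indel_length_alt (ref : String) (alt : String) : Int :=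
  let r := ref.toList
  let a := alt.toList
  let lr := r.length
  let la := a.length
  let m := min lr la
  let i := pvLoopI r a m 0
  let j := pvLoopJ r a lr la m i 0
  ((max lr la : Nat) : Int) - (i : Int) - (j : Int)

-- ===== PRECONDITION & SPEC =====
def Spec_get_variant_indel_length (ref : String) (alt : String) (out : Int) : Prop := out = get_variant_indel_length_alt ref alt
instance (ref : String) (alt : String) (out : Int) : Decidable (Spec_get_variant_indel_length ref alt out) := by unfold Spec_get_variant_indel_length; infer_instance

-- ===== CLAIM (what is proved, stated in full; the proofs are below) =====
def Claim_equal_get_variant_indel_length : Prop := ∀ (ref : String) (alt : String), Dom_get_variant_indel_length ref alt → Spec_get_variant_indel_length ref alt (get_variant_indel_length ref alt)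

-- ===== LEMMAS AND PROOFS =====

-- length of the longest common prefix
def pvPrefLen : List Char → List Char → Nat
  | x :: xs, y :: ys => if x = y then pvPrefLen xs ys + 1 else 0
  | _, _ => 0

@[simp] theorem pvPrefLen_nil_left (y : List Char) : pvPrefLen [] y = 0 := by cases y <;> rfl

@[simp] theorem pvPrefLen_nil_right (x : List Char) : pvPrefLen x [] = 0 := by cases x <;> rfl

@[simp] theorem pvPrefLen_cons (x y : Char) (xs ys : List Char) :
    pvPrefLen (x :: xs) (y :: ys) = if x = y then pvPrefLen xs ys + 1 else 0 := rfl

theorem pvPrefLen_le (x y : List Char) : pvPrefLen x y ≤ min x.length y.length := by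
  induction x generalizing y with
  | nil => simp
  | cons a xs ih =>
    cases y with
    | nil => simp
    | cons b ys =>
      have := ih ys
      by_cases h : a = b
      · simp [h]; omega
      · simp [h]

theorem pvTrimPrefix_eq (r a : List Char) :
    pvTrimPrefix r a = (r.drop (pvPrefLen r a), a.drop (pvPrefLen r a)) := by
  induction r generalizing a with
  | nil => cases a <;> simp [pvTrimPrefix]
  | cons x xs ih =>
    cases a with
    | nil => simp [pvTrimPrefix]
    | cons y ys =>
      by_cases h : x = y
      · simp [pvTrimPrefix, h, ih ys]
      · simp [pvTrimPrefix, h]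

theorem pvPrefLen_take (x : List Char) : ∀ (y : List Char) (n k : Nat),
    pvPrefLen (x.take n) (y.take k) = min (pvPrefLen x y) (min n k) := by
  induction x with
  | nil => intro y n k; simp
  | cons a xs ih =>
    intro y n k
    cases y with
    | nil => simp
    | cons b ys =>
      cases n with
      | zero => simp
      | succ n' =>
        cases k with
        | zero => simp
        | succ k' =>
          by_cases h : a = b
          · simp [h, ih ys n' k']
          · simp [h]

theorem pvTrimSuffix_eq (r a : List Char) :
    pvTrimSuffix r a =
      ((pvTrimPrefix r.reverse a.reverse).1.reverse, (pvTrimPrefix r.reverse a.reverse).2.reverse) := by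
  generalize hn : r.length = n
  induction n using Nat.strong_induction_on generalizing r a with
  | _ n ih =>
    rw [pvTrimSuffix]
    by_cases hr : r = []
    · subst hr; simp [pvTrimPrefix]
    by_cases ha : a = []
    · simp [ha, hr, pvTrimPrefix]
    obtain ⟨x, t, hxt⟩ : ∃ x t, r.reverse = x :: t := by
      cases hrev : r.reverse with
      | nil => exact absurd (by simpa using congrArg List.reverse hrev) hr
      | cons x t => exact ⟨x, t, rfl⟩
    obtain ⟨y, s, hys⟩ : ∃ y s, a.reverse = y :: s := by
      cases hrev : a.reverse with
      | nil => exact absurd (by simpa using congrArg List.reverse hrev) ha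
      | cons y s => exact ⟨y, s, rfl⟩
    have hrform : r = t.reverse ++ [x] := by
      rw [← List.reverse_reverse r, hxt]; simp
    have haform : a = s.reverse ++ [y] := by
      rw [← List.reverse_reverse a, hys]; simp
    have hlastr : r.getLastD ' ' = x := by rw [hrform]; simp
    have hlasta : a.getLastD ' ' = y := by rw [haform]; simp
    have hdropr : r.dropLast = t.reverse := by rw [hrform]; simp
    have hdropa : a.dropLast = s.reverse := by rw [haform]; simp
    by_cases hxy : x = y
    · have hcond : r ≠ [] ∧ a ≠ [] ∧ r.getLastD ' ' = a.getLastD ' ' :=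
        ⟨hr, ha, by rw [hlastr, hlasta, hxy]⟩
      rw [if_pos hcond, hdropr, hdropa]
      have hlt : t.reverse.length < n := by
        have : r.length = t.length + 1 := by rw [hrform]; simp
        simp; omega
      rw [ih t.reverse.length (by omega) t.reverse s.reverse rfl]
      simp [hxt, hys, pvTrimPrefix, hxy]
    · have hcond : ¬ (r ≠ [] ∧ a ≠ [] ∧ r.getLastD ' ' = a.getLastD ' ') := by
        intro hc; exact hxy (by rw [← hlastr, ← hlasta, hc.2.2])
      rw [if_neg hcond]
      rw [hxt, hys]
      simp [pvTrimPrefix, hxy, ← hxt, ← hys]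

theorem pvLoopI_eq (r a : List Char) (m : Nat) (hm : m = min r.length a.length) :
    ∀ (k i : Nat), m - i ≤ k → pvLoopI r a m i = i + pvPrefLen (r.drop i) (a.drop i) := by
  intro k
  induction k with
  | zero =>
    intro i hk
    rw [pvLoopI, if_neg (by omega)]
    have : r.length ≤ i ∨ a.length ≤ i := by omega
    rcases this with h | h
    · rw [List.drop_eq_nil_of_le h]; simp
    · rw [List.drop_eq_nil_of_le (as := a) h]; simp
  | succ k' ih =>
    intro i hk
    by_cases hi : i < m
    · have hir : i < r.length := by omega
      have hia : i < a.length := by omega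
      have hdr : r.drop i = r[i] :: r.drop (i + 1) := List.drop_eq_getElem_cons hir
      have hda : a.drop i = a[i] :: a.drop (i + 1) := List.drop_eq_getElem_cons hia
      by_cases hc : r.getD i ' ' = a.getD i ' '
      · rw [pvLoopI, if_pos ⟨hi, hc⟩, ih (i + 1) (by omega)]
        have hx : r[i] = a[i] := by
          rwa [List.getD_eq_getElem r ' ' hir, List.getD_eq_getElem a ' ' hia] at hc
        rw [hdr, hda, pvPrefLen_cons, if_pos hx]; omega
      · rw [pvLoopI, if_neg (by tauto)]
        have hx : ¬ r[i] = a[i] := by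
          rw [List.getD_eq_getElem r ' ' hir, List.getD_eq_getElem a ' ' hia] at hc; exact hc
        rw [hdr, hda, pvPrefLen_cons, if_neg hx]; omega
    · rw [pvLoopI, if_neg (by omega)]
      have : r.length ≤ i ∨ a.length ≤ i := by omega
      rcases this with h | h
      · rw [List.drop_eq_nil_of_le h]; simp
      · rw [List.drop_eq_nil_of_le (as := a) h]; simp

theorem pvLoopJ_eq (r a : List Char) (m i : Nat)
    (hm : m = min r.length a.length) (hi : i ≤ m) :
    ∀ (k j : Nat), m - i - j ≤ k →
      pvLoopJ r a r.length a.length m i j =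
        j + min (pvPrefLen (r.reverse.drop j) (a.reverse.drop j)) (m - i - j) := by
  intro k
  induction k with
  | zero =>
    intro j hk
    rw [pvLoopJ, if_neg (by omega)]
    omega
  | succ k' ih =>
    intro j hk
    by_cases hj : j < m - i
    · have hjr : j < r.length := by omega
      have hja : j < a.length := by omega
      have hjr' : j < r.reverse.length := by simpa using hjr
      have hja' : j < a.reverse.length := by simpa using hja
      have hdr : r.reverse.drop j = r.reverse[j] :: r.reverse.drop (j + 1) :=
        List.drop_eq_getElem_cons hjr'
      have hda : a.reverse.drop j = a.reverse[j] :: a.reverse.drop (j + 1) :=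
        List.drop_eq_getElem_cons hja'
      have hrg : r.getD (r.length - 1 - j) ' ' = r.reverse[j] := by
        rw [List.getElem_reverse, List.getD_eq_getElem r ' ' (by omega)]
      have hag : a.getD (a.length - 1 - j) ' ' = a.reverse[j] := by
        rw [List.getElem_reverse, List.getD_eq_getElem a ' ' (by omega)]
      by_cases hc : r.getD (r.length - 1 - j) ' ' = a.getD (a.length - 1 - j) ' '
      · rw [pvLoopJ, if_pos ⟨hj, hc⟩, ih (j + 1) (by omega)]
        have hx : r.reverse[j] = a.reverse[j] := by rw [← hrg, ← hag]; exact hc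
        rw [hdr, hda, pvPrefLen_cons, if_pos hx]; omega
      · rw [pvLoopJ, if_neg (by tauto)]
        have hx : ¬ r.reverse[j] = a.reverse[j] := by rw [← hrg, ← hag]; exact hc
        rw [hdr, hda, pvPrefLen_cons, if_neg hx]; omega
    · rw [pvLoopJ, if_neg (by omega)]; omega

-- ===== VERDICT (by name: the statement is the Claim_ definition above) =====
theorem get_variant_indel_length_spec : Claim_equal_get_variant_indel_length := by
  intro ref alt _
  unfold Spec_get_variant_indel_length
  set r := ref.toList with hr
  set a := alt.toList with ha
  set p := pvPrefLen r a with hp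
  set P := pvPrefLen r.reverse a.reverse with hP
  set s := min P (min r.length a.length - p) with hsdef
  have hple : p ≤ min r.length a.length := pvPrefLen_le r a
  have hPle : P ≤ min r.length a.length := by
    have := pvPrefLen_le r.reverse a.reverse
    simpa using this
  -- B side
  have hiB : pvLoopI r a (min r.length a.length) 0 = p := by
    rw [pvLoopI_eq r a (min r.length a.length) rfl (min r.length a.length) 0 (by omega)]
    simp [hp]
  have hjB : pvLoopJ r a r.length a.length (min r.length a.length) p 0 = s := by
    rw [pvLoopJ_eq r a (min r.length a.length) p rfl hple (min r.length a.length - p) 0 (by omega)]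
    simp [hP, hsdef]
  -- A side
  have hA1 : pvTrimPrefix r a = (r.drop p, a.drop p) := pvTrimPrefix_eq r a
  have hs : pvPrefLen (r.drop p).reverse (a.drop p).reverse = s := by
    rw [List.reverse_drop, List.reverse_drop, pvPrefLen_take]
    simp [hP, hsdef]
    omega
  have hA3 : pvTrimPrefix (r.drop p).reverse (a.drop p).reverse =
      ((r.drop p).reverse.drop s, (a.drop p).reverse.drop s) := by
    rw [pvTrimPrefix_eq, hs]
  have hlen1 : ((pvTrimSuffix (pvTrimPrefix r a).1 (pvTrimPrefix r a).2).1).length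
      = r.length - p - s := by
    rw [hA1]; simp only
    rw [pvTrimSuffix_eq, hA3]; simp
  have hlen2 : ((pvTrimSuffix (pvTrimPrefix r a).1 (pvTrimPrefix r a).2).2).length
      = a.length - p - s := by
    rw [hA1]; simp only
    rw [pvTrimSuffix_eq, hA3]; simp
  have hAeq : get_variant_indel_length ref alt
      = ((max (r.length - p - s) (a.length - p - s) : Nat) : Int) := by
    show ((max ((pvTrimSuffix (pvTrimPrefix r a).1 (pvTrimPrefix r a).2).1).length
               ((pvTrimSuffix (pvTrimPrefix r a).1 (pvTrimPrefix r a).2).2).length : Nat) : Int) = _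
    rw [hlen1, hlen2]
  have hBeq : get_variant_indel_length_alt ref alt
      = ((max r.length a.length : Nat) : Int) - (p : Int) - (s : Int) := by
    show ((max r.length a.length : Nat) : Int)
        - (pvLoopI r a (min r.length a.length) 0 : Int)
        - (pvLoopJ r a r.length a.length (min r.length a.length)
            (pvLoopI r a (min r.length a.length) 0) 0 : Int) = _
    rw [hiB, hjB]
  rw [hAeq, hBeq]
  omega
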